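-- pv_equiv track=rewrite | github.com/lobbyview/LobbyViewPythonPackage | docs/generate_readme.py | clean_code_example
-- ===== SOURCE A (Python) =====
-- def clean_code_example(text):
--     """Clean up code example formatting."""
--     # Remove RST code block indicators
--     text = text.replace('.. code-block:: python\n\n', '')
--     text = text.replace('.. code-block:: text\n\n', '')
--
--     # Fix code block formatting
--     lines = text.split('\n')
--     clean_lines = []
--     in_code_block = False
--
--     for line in lines:
--         stripped = line.strip()
--
--         # Start code block
--         if stripped.startswith('>>>'):
--             if not in_code_block:
--                 clean_lines.append('```python')
--                 in_code_block = True
--             clean_lines.append(line)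
--         # Handle code block content
--         elif in_code_block and stripped:
--             clean_lines.append(line)
--         # End code block on empty line if in code block
--         elif in_code_block and not stripped:
--             clean_lines.append('```')
--             clean_lines.append('')
--             in_code_block = False
--         # Normal line
--         else:
--             clean_lines.append(line)
--
--     # Close any open code block
--     if in_code_block:
--         clean_lines.append('```')
--
--     return '\n'.join(clean_lines)
-- ===== SOURCE B (Python) =====
-- def clean_code_example(text):
--     """Clean up code example formatting."""
--     text = text.replace('.. code-block:: python\n\n', '')
--     text = text.replace('.. code-block:: text\n\n', '')
--     lines = text.split('\n')
--     out = []
--     i = 0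
--     n = len(lines)
--     while i < n:
--         if lines[i].strip().startswith('>>>'):
--             out.append('```python')
--             while i < n and lines[i].strip():
--                 out.append(lines[i])
--                 i += 1
--             out.append('```')
--             if i < n:  # block closed by a blank line
--                 out.append('')
--                 i += 1
--         else:
--             out.append(lines[i])
--             i += 1
--     return '\n'.join(out)
-- ===== Notes on version B (the rewrite author's own statement) =====
-- stated objective: alternative
-- what changed: Replaces the per-line boolean state-flag fold with an index-based outer/inner while-loop decomposition: on a line that opens a code block an inner loop consumes the whole block up to the closing blank line or end of input, so no in_code_block flag is carried across lines.
import Mathlib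
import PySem

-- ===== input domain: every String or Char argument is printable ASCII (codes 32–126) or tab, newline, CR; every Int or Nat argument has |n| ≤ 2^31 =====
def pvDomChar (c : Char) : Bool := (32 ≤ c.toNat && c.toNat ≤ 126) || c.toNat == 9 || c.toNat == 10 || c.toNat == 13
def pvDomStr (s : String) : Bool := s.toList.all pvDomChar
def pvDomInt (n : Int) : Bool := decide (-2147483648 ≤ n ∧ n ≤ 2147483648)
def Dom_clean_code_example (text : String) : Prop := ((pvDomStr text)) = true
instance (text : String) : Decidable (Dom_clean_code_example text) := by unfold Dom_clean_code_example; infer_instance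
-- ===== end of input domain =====

-- B replaces A's per-line state-flag fold with an outer/inner while-loop decomposition
-- that consumes each code block in an inner loop (objective: alternative structure, same cost).


-- ===== PORT A =====
-- one step of A's for-loop; state = (clean_lines, in_code_block)
def aStep (st : List String × Bool) (line : String) : List String × Bool :=
  let stripped := PySem.Str.strip line
  if PySem.Str.startswith stripped ">>>" then
    if st.2 then (st.1 ++ [line], true) else (st.1 ++ ["```python", line], true)
  else if st.2 && (PySem.Str.len stripped != 0) then (st.1 ++ [line], true)
  else if st.2 then (st.1 ++ ["```", ""], false)
  else (st.1 ++ [line], false)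

-- A's trailing '# Close any open code block'
def aFinish (st : List String × Bool) : List String :=
  if st.2 then st.1 ++ ["```"] else st.1

def clean_code_example (text : String) : String :=
  let t1 := PySem.Str.replace text ".. code-block:: python\n\n" ""
  let t2 := PySem.Str.replace t1 ".. code-block:: text\n\n" ""
  let lines := (PySem.Chars.splitOn t2.toList "\n".toList).map String.ofList
  PySem.Str.join "\n" (aFinish (lines.foldl aStep ([], false)))

-- ===== PORT B =====
-- bGo = B's outer while loop (on the remaining suffix of lines); bInner = the inner loop
-- consuming an open code block until a blank line or end of list.
mutual
  def bGo : List String → List String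
    | [] => []
    | l :: rest =>
      if PySem.Str.startswith (PySem.Str.strip l) ">>>" then
        "```python" :: bInner (l :: rest)
      else
        l :: bGo rest
  termination_by xs => (xs.length, 1)
  def bInner : List String → List String
    | [] => ["```"]
    | l :: rest =>
      if PySem.Str.len (PySem.Str.strip l) != 0 then
        l :: bInner rest
      else
        "```" :: "" :: bGo rest
  termination_by xs => (xs.length, 0)
end

def clean_code_example_alt (text : String) : String :=
  let t1 := PySem.Str.replace text ".. code-block:: python\n\n" ""
  let t2 := PySem.Str.replace t1 ".. code-block:: text\n\n" ""
  PySem.Str.join "\n" (bGo ((PySem.Chars.splitOn t2.toList "\n".toList).map String.ofList))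

-- ===== PRECONDITION & SPEC =====
def Spec_clean_code_example (text : String) (out : String) : Prop := out = clean_code_example_alt text
instance (text : String) (out : String) : Decidable (Spec_clean_code_example text out) := by unfold Spec_clean_code_example; infer_instance

-- ===== CLAIM (what is proved, stated in full; the proofs are below) =====
def Claim_equal_clean_code_example : Prop := ∀ (text : String), Dom_clean_code_example text → Spec_clean_code_example text (clean_code_example text)

-- ===== LEMMAS AND PROOFS =====

-- a line whose strip starts with '>>>' strips to a nonempty string
lemma strip_startswith_ne_empty (l : String)
    (h : PySem.Chars.startswith (PySem.Chars.strip l.toList) ['>', '>', '>'] = true) :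
    PySem.Chars.strip l.toList ≠ [] := by
  obtain ⟨t, ht⟩ := (PySem.Chars.startswith_iff _ _).mp h
  rw [← ht]; simp

-- the invariant linking A's fold (with accumulator and flag) to B's two loops
lemma loop_equiv : ∀ (lines : List String) (acc : List String) (b : Bool),
    aFinish (lines.foldl aStep (acc, b)) =
      acc ++ (if b then bInner lines else bGo lines) := by
  intro lines
  induction lines with
  | nil =>
    intro acc b
    cases b <;> simp [aFinish, bGo, bInner]
  | cons l rest ih =>
    intro acc b
    by_cases hs : PySem.Chars.startswith (PySem.Chars.strip l.toList) ['>', '>', '>'] = true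
    · have hne := strip_startswith_ne_empty l hs
      cases b with
      | true =>
        have h1 : aStep (acc, true) l = (acc ++ [l], true) := by simp [aStep, hs]
        rw [List.foldl_cons, h1, ih]
        simp [bInner, hne, List.append_assoc]
      | false =>
        have h1 : aStep (acc, false) l = (acc ++ ["```python", l], true) := by
          simp [aStep, hs]
        rw [List.foldl_cons, h1, ih]
        simp [bGo, bInner, hs, hne, List.append_assoc]
    · cases b with
      | true =>
        by_cases hn : PySem.Chars.strip l.toList = []
        · have h1 : aStep (acc, true) l = (acc ++ ["```", ""], false) := by
            simp [aStep, hn]; decide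
          rw [List.foldl_cons, h1, ih]
          simp [bInner, hn, List.append_assoc]
        · have h1 : aStep (acc, true) l = (acc ++ [l], true) := by
            simp [aStep, hs, hn]
          rw [List.foldl_cons, h1, ih]
          simp [bInner, hn, List.append_assoc]
      | false =>
        have h1 : aStep (acc, false) l = (acc ++ [l], false) := by simp [aStep, hs]
        rw [List.foldl_cons, h1, ih]
        simp [bGo, hs, List.append_assoc]

-- ===== VERDICT (by name: the statement is the Claim_ definition above) =====
theorem clean_code_example_spec : Claim_equal_clean_code_example := by
  intro text _
  unfold Spec_clean_code_example clean_code_example clean_code_example_alt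
  simp only [loop_equiv, List.nil_append, if_neg Bool.false_ne_true]
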